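-- pv_equiv track=rewrite | github.com/Dousery/CodeMateTR | agents/cv_job_matcher.py | _get_fallback_positions
-- ===== SOURCE A (Python) =====
-- def _get_fallback_positions(cv_analysis):
--     """CV analizi başarısız olursa fallback pozisyonlar"""
--     positions = []
--
--     if cv_analysis.get('skills'):
--         if any('python' in skill.lower() for skill in cv_analysis['skills']):
--             positions.append('Python Developer')
--         if any('data' in skill.lower() for skill in cv_analysis['skills']):
--             positions.append('Data Scientist')
--         if any('machine' in skill.lower() or 'ml' in skill.lower() for skill in cv_analysis['skills']):
--             positions.append('Machine Learning Engineer')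
--
--     if cv_analysis.get('technologies'):
--         if any('java' in tech.lower() for tech in cv_analysis['technologies']):
--             positions.append('Software Engineer')
--         if any('sql' in tech.lower() for tech in cv_analysis['technologies']):
--             positions.append('Business Analyst')
--
--     if not positions:
--         positions = ['Software Engineer', 'Data Scientist', 'Business Analyst']
--
--     return positions[:3]
-- ===== SOURCE B (Python) =====
-- _FIELD_KWS = (('skills', ('python', 'data', 'machine', 'ml')),
--               ('technologies', ('java', 'sql')))
--
-- def _get_fallback_positions(cv_analysis):
--     """CV analizi basarisiz olursa fallback pozisyonlar (keyword-set version):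
--     one pass over the CV items collects the set of matched keywords, then the
--     positions are derived from membership flags."""
--     found = set()
--     for field, kws in _FIELD_KWS:
--         for item in cv_analysis.get(field) or ():
--             low = item.lower()
--             found.update(kw for kw in kws if kw in low)
--     positions = []
--     if 'python' in found:
--         positions.append('Python Developer')
--     if 'data' in found:
--         positions.append('Data Scientist')
--     if 'machine' in found or 'ml' in found:
--         positions.append('Machine Learning Engineer')
--     if 'java' in found:
--         positions.append('Software Engineer')
--     if 'sql' in found:
--         positions.append('Business Analyst')
--     return (positions or ['Software Engineer', 'Data Scientist', 'Business Analyst'])[:3]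
-- ===== Notes on version B (the rewrite author's own statement) =====
-- stated objective: alternative
-- what changed: Instead of re-scanning the skill/technology lists once per rule with per-rule any() cascades, B makes a single pass over the CV items that accumulates a set of matched keywords, and then derives the position list from membership flags on that set.
import Mathlib
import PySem

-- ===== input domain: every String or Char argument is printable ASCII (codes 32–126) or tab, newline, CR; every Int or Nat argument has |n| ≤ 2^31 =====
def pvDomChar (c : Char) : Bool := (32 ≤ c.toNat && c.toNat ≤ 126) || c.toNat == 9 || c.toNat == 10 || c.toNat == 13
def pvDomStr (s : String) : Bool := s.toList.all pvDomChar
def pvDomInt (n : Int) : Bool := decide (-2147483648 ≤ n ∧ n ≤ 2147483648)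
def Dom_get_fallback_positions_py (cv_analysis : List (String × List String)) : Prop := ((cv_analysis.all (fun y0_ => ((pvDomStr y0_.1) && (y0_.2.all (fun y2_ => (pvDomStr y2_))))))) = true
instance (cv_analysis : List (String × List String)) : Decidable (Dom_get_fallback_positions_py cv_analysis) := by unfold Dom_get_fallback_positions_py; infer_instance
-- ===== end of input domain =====

-- ===== PORT A =====
-- B replaces A's per-rule rescans of the lists with one pass that collects a set of
-- matched keywords, from which the positions are then derived.
-- 'kw in s.lower()' for one string
def pvHasKw (kw : String) (s : String) : Bool := PySem.Str.isIn kw (PySem.Str.lower s)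

def get_fallback_positions_py (cv_analysis : List (String × List String)) : List String :=
  let d := PySem.Dict.ofList cv_analysis
  let positions : List String := []
  let positions :=
    if !(PySem.Dict.getD d "skills" ([] : List String)).isEmpty then
      let skills := PySem.Dict.getD d "skills" ([] : List String)
      let positions := if skills.any (fun s => pvHasKw "python" s) then positions ++ ["Python Developer"] else positions
      let positions := if skills.any (fun s => pvHasKw "data" s) then positions ++ ["Data Scientist"] else positions
      let positions := if skills.any (fun s => pvHasKw "machine" s || pvHasKw "ml" s) then positions ++ ["Machine Learning Engineer"] else positions
      positions
    else positions
  let positions :=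
    if !(PySem.Dict.getD d "technologies" ([] : List String)).isEmpty then
      let techs := PySem.Dict.getD d "technologies" ([] : List String)
      let positions := if techs.any (fun s => pvHasKw "java" s) then positions ++ ["Software Engineer"] else positions
      let positions := if techs.any (fun s => pvHasKw "sql" s) then positions ++ ["Business Analyst"] else positions
      positions
    else positions
  let positions := if positions.isEmpty then ["Software Engineer", "Data Scientist", "Business Analyst"] else positions
  PySem.List.slice positions none (some 3)

-- ===== PORT B =====
-- the two (field, keyword tuple) pairs B iterates over
def pvFieldKws : List (String × List String) :=
  [("skills", ["python", "data", "machine", "ml"]), ("technologies", ["java", "sql"])]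

-- found.update(kw for kw in kws if kw in low)
def pvAddFound (kws : List String) (s : PySem.Set String) (item : String) : PySem.Set String :=
  PySem.Set.update s (kws.filter (fun kw => pvHasKw kw item))

def get_fallback_positions_py_alt (cv_analysis : List (String × List String)) : List String :=
  let d := PySem.Dict.ofList cv_analysis
  let found : PySem.Set String :=
    pvFieldKws.foldl
      (fun s fk => (PySem.Dict.getD d fk.1 ([] : List String)).foldl (pvAddFound fk.2) s)
      PySem.Set.empty
  let positions : List String := []
  let positions := if PySem.Set.contains found "python" then positions ++ ["Python Developer"] else positions
  let positions := if PySem.Set.contains found "data" then positions ++ ["Data Scientist"] else positions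
  let positions := if PySem.Set.contains found "machine" || PySem.Set.contains found "ml" then positions ++ ["Machine Learning Engineer"] else positions
  let positions := if PySem.Set.contains found "java" then positions ++ ["Software Engineer"] else positions
  let positions := if PySem.Set.contains found "sql" then positions ++ ["Business Analyst"] else positions
  PySem.List.slice (if positions.isEmpty then ["Software Engineer", "Data Scientist", "Business Analyst"] else positions) none (some 3)

-- ===== PRECONDITION & SPEC =====
def Spec_get_fallback_positions_py (cv_analysis : List (String × List String)) (out : List String) : Prop := out = get_fallback_positions_py_alt cv_analysis
instance (cv_analysis : List (String × List String)) (out : List String) : Decidable (Spec_get_fallback_positions_py cv_analysis out) := by unfold Spec_get_fallback_positions_py; infer_instance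

-- ===== CLAIM =====
def Claim_equal_get_fallback_positions_py : Prop := ∀ (cv_analysis : List (String × List String)), Dom_get_fallback_positions_py cv_analysis → Spec_get_fallback_positions_py cv_analysis (get_fallback_positions_py cv_analysis)

-- ===== LEMMAS AND PROOFS =====
theorem mem_foldFound (kws items : List String) (s : PySem.Set String) (x : String) :
    x ∈ items.foldl (pvAddFound kws) s ↔ x ∈ s ∨ (x ∈ kws ∧ items.any (pvHasKw x) = true) := by
  induction items generalizing s with
  | nil => simp
  | cons a t ih =>
    rw [List.foldl_cons, ih]
    simp only [pvAddFound, PySem.Set.mem_update, List.mem_filter, List.any_cons, Bool.or_eq_true]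
    tauto

theorem contains_found (skills techs : List String) (x : String) :
    PySem.Set.contains
      (techs.foldl (pvAddFound ["java", "sql"])
        (skills.foldl (pvAddFound ["python", "data", "machine", "ml"]) PySem.Set.empty)) x = true ↔
      (x ∈ (["python", "data", "machine", "ml"] : List String) ∧ skills.any (pvHasKw x) = true) ∨
      (x ∈ (["java", "sql"] : List String) ∧ techs.any (pvHasKw x) = true) := by
  rw [PySem.Set.contains_iff, mem_foldFound, mem_foldFound]
  simp [PySem.Set.empty]

theorem any_or {α : Type} (l : List α) (p q : α → Bool) :
    l.any (fun x => p x || q x) = (l.any p || l.any q) := by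
  induction l with
  | nil => rfl
  | cons a t ih => simp only [List.any_cons, ih]; cases p a <;> cases q a <;> simp

theorem ports_core (skills techs : List String) :
    (let positions : List String := []
     let positions :=
       if !skills.isEmpty then
         let positions := if skills.any (fun s => pvHasKw "python" s) then positions ++ ["Python Developer"] else positions
         let positions := if skills.any (fun s => pvHasKw "data" s) then positions ++ ["Data Scientist"] else positions
         let positions := if skills.any (fun s => pvHasKw "machine" s || pvHasKw "ml" s) then positions ++ ["Machine Learning Engineer"] else positions
         positions
       else positions
     let positions :=
       if !techs.isEmpty then
         let positions := if techs.any (fun s => pvHasKw "java" s) then positions ++ ["Software Engineer"] else positions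
         let positions := if techs.any (fun s => pvHasKw "sql" s) then positions ++ ["Business Analyst"] else positions
         positions
       else positions
     let positions := if positions.isEmpty then ["Software Engineer", "Data Scientist", "Business Analyst"] else positions
     PySem.List.slice positions none (some 3))
    =
    (let found : PySem.Set String :=
       techs.foldl (pvAddFound ["java", "sql"])
         (skills.foldl (pvAddFound ["python", "data", "machine", "ml"]) PySem.Set.empty)
     let positions : List String := []
     let positions := if PySem.Set.contains found "python" then positions ++ ["Python Developer"] else positions
     let positions := if PySem.Set.contains found "data" then positions ++ ["Data Scientist"] else positions
     let positions := if PySem.Set.contains found "machine" || PySem.Set.contains found "ml" then positions ++ ["Machine Learning Engineer"] else positions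
     let positions := if PySem.Set.contains found "java" then positions ++ ["Software Engineer"] else positions
     let positions := if PySem.Set.contains found "sql" then positions ++ ["Business Analyst"] else positions
     PySem.List.slice (if positions.isEmpty then ["Software Engineer", "Data Scientist", "Business Analyst"] else positions) none (some 3)) := by
  have hc : ∀ x : String,
      PySem.Set.contains
        (techs.foldl (pvAddFound ["java", "sql"])
          (skills.foldl (pvAddFound ["python", "data", "machine", "ml"]) PySem.Set.empty)) x =
      ((decide (x ∈ (["python", "data", "machine", "ml"] : List String)) && skills.any (pvHasKw x)) ||
       (decide (x ∈ (["java", "sql"] : List String)) && techs.any (pvHasKw x))) := by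
    intro x
    rw [Bool.eq_iff_iff, contains_found]
    simp
  simp only [hc]
  simp only [List.mem_cons, List.not_mem_nil, or_false, false_or, String.reduceEq,
    decide_true, decide_false, Bool.true_and, Bool.false_and, Bool.or_false, Bool.false_or]
  rw [any_or skills (pvHasKw "machine") (pvHasKw "ml")]
  cases skills with
  | nil =>
    cases techs with
    | nil => rfl
    | cons a t =>
      simp only [List.any_nil, List.isEmpty_cons, List.isEmpty_nil]
      generalize (a :: t).any (pvHasKw "java") = b4
      generalize (a :: t).any (pvHasKw "sql") = b5
      cases b4 <;> cases b5 <;> rfl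
  | cons a t =>
    simp only [List.isEmpty_cons]
    generalize (a :: t).any (pvHasKw "python") = b1
    generalize (a :: t).any (pvHasKw "data") = b2
    generalize (a :: t).any (pvHasKw "machine") = b3
    generalize (a :: t).any (pvHasKw "ml") = b3'
    cases techs with
    | nil =>
      simp only [List.any_nil, List.isEmpty_nil]
      cases b1 <;> cases b2 <;> cases b3 <;> cases b3' <;> rfl
    | cons c u =>
      simp only [List.isEmpty_cons]
      generalize (c :: u).any (pvHasKw "java") = b4
      generalize (c :: u).any (pvHasKw "sql") = b5
      cases b1 <;> cases b2 <;> cases b3 <;> cases b3' <;> cases b4 <;> cases b5 <;> rfl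

theorem ports_agree (cv_analysis : List (String × List String)) :
    get_fallback_positions_py cv_analysis = get_fallback_positions_py_alt cv_analysis :=
  ports_core (PySem.Dict.getD (PySem.Dict.ofList cv_analysis) "skills" ([] : List String))
    (PySem.Dict.getD (PySem.Dict.ofList cv_analysis) "technologies" ([] : List String))

-- ===== VERDICT =====
theorem get_fallback_positions_py_spec : Claim_equal_get_fallback_positions_py := by
  intro cv _
  unfold Spec_get_fallback_positions_py
  exact ports_agree cv
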